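-- pv_equiv track=rewrite | github.com/Adamd3vs/UC-San-Diego | Assingments for UC San Diego 6/Advenced Algorithms and Complexity assignments1/phi_errorfree.py | compute_best_successors
-- ===== SOURCE A (Python) =====
-- from typing import List, Dict, Tuple, Optional
--
-- def compute_overlap(a: str, b: str, min_overlap: int) -> int:
--     """
--     a ning OXIRI bilan b ning BOSHI o'rtasidagi MAKSIMAL overlap uzunligini qaytaradi.
--
--     Shart:
--         overlap uzunligi >= min_overlap bo'lsa, o'sha uzunlikni qaytar.
--         Aks holda 0 qaytar.
--
--     Misol:
--         a = "AACGT"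
--         b = "GTTC"
--         a oxiri "GT" bilan b boshi "GT" ustma-ust => overlap = 2
--     """
--     max_len = min(len(a), len(b))
--     # Katta overlapdan kichigiga qarab tekshiramiz
--     for ov in range(max_len, min_overlap - 1, -1):
--         if a[-ov:] == b[:ov]:
--             return ov
--     return 0
--
-- def compute_best_successors(
--     reads: List[str],
--     index: Dict[str, List[int]],
--     k: int,
--     min_overlap: int,
-- ) -> Tuple[List[Optional[int]], List[int]]:
--     """
--     Har bir read i uchun:
--       - candidate bo'lgan read j larni top (suffix k-mer orqali)
--       - ular bilan overlapni hisobla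
--       - eng katta overlap beradigan j ni tanla
--
--     Natija:
--       - best_next[i] -> keyingi read indexi (yoki None)
--       - best_ov[i]   -> shu edge overlap uzunligi (yoki 0)
--     """
--     n = len(reads)
--     best_next: List[Optional[int]] = [None] * n
--     best_ov: List[int] = [0] * n
--
--     for i in range(n):
--         read_i = reads[i]
--         if len(read_i) < k:
--             continue
--         suffix = read_i[-k:]
--         candidates = index.get(suffix, [])
--
--         best_j: Optional[int] = None
--         best_overlap = 0
--
--         for j in candidates:
--             if j == i:
--                 continue
--             ov = compute_overlap(read_i, reads[j], min_overlap)
--             if ov > best_overlap: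
--                 best_overlap = ov
--                 best_j = j
--
--         best_next[i] = best_j
--         best_ov[i] = best_overlap
--
--     return best_next, best_ov
-- ===== SOURCE B (Python) =====
-- SEP = "\x01"  # separator character, never present in the (printable-ASCII) reads
--
--
-- def _kmp_longest_overlap(a, b, min_overlap):
--     """Longest ov with a[-ov:] == b[:ov], via the KMP prefix function of
--     b + SEP + a (one linear pass), thresholded at min_overlap."""
--     s = b + SEP + a
--     pi = [0]
--     q = 0
--     for i in range(1, len(s)):
--         while q > 0 and s[i] != s[q]:
--             q = pi[q - 1]
--         if s[i] == s[q]: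
--             q += 1
--         pi.append(q)
--     return q if q >= min_overlap else 0
--
--
-- def compute_best_successors(reads, index, k, min_overlap):
--     def entry(i, a):
--         if len(a) < k:
--             return (None, 0)
--         scored = []
--         for j in index.get(a[-k:], []):
--             if j != i:
--                 ov = _kmp_longest_overlap(a, reads[j], min_overlap)
--                 if ov > 0:
--                     scored.append((ov, j))
--         if not scored:
--             return (None, 0)
--         ov, j = max(scored, key=lambda t: t[0])
--         return (j, ov)
--
--     pairs = [entry(i, a) for i, a in enumerate(reads)]
--     return [p[0] for p in pairs], [p[1] for p in pairs]
-- ===== Notes on version B (the rewrite author's own statement) =====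
-- stated objective: alternative
-- what changed: B computes each candidate overlap in one linear KMP prefix-function pass over b+SEP+a instead of A's downward scan that slices and compares every overlap length, and replaces A's in-place mutation of two preallocated arrays by a per-read comprehension whose winner is picked with max(key=overlap); the per-pair scan is worst-case linear instead of quadratic, but on random inputs A's C-level slicing is not slower, so no speed is claimed.
import Mathlib
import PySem

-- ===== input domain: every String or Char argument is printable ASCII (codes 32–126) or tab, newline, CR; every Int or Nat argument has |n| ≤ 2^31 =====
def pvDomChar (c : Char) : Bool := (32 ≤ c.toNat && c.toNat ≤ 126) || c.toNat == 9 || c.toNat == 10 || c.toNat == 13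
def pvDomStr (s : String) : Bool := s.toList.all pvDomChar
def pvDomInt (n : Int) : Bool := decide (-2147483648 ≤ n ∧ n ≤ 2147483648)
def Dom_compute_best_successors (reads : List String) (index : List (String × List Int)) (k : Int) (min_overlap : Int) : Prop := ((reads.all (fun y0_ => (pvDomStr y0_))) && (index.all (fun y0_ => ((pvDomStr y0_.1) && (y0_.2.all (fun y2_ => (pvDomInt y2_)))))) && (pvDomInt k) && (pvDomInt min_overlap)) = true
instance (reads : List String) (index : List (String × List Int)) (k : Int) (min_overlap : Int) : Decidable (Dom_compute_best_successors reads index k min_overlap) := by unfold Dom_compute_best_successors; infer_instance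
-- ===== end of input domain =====

-- B computes each candidate overlap with one KMP prefix-function pass over b+SEP+a instead of
-- A's downward scan slicing and comparing every overlap length, and replaces A's in-place mutation of
-- two preallocated arrays by a per-read comprehension selected with max(key); objective: alternative.

-- ===== PORT A =====
def overlapLoopA (a b : String) : List Int → Int
  | [] => 0
  | ov :: rest =>
    if PySem.Str.slice a (some (-ov)) none == PySem.Str.slice b none (some ov) then ov
    else overlapLoopA a b rest

def compute_overlapA (a b : String) (min_overlap : Int) : Int :=
  let max_len := min (PySem.Str.len a) (PySem.Str.len b)
  overlapLoopA a b (PySem.List.pyRange max_len (min_overlap - 1) (-1))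

def compute_best_successors (reads : List String) (index : List (String × List Int)) (k : Int) (min_overlap : Int) : List (Option Int) × List Int :=
  let n : Int := PySem.List.len reads
  let init : List (Option Int) × List Int := (List.replicate reads.length none, List.replicate reads.length (0 : Int))
  (PySem.List.pyRange 0 n).foldl (fun st i =>
    let read_i := PySem.List.pyGetD reads i ""
    if PySem.Str.len read_i < k then st
    else
      let suffix := PySem.Str.slice read_i (some (-k)) none
      let candidates := (PySem.Dict.ofList index).getD suffix []
      let best := candidates.foldl (fun (bs : Option Int × Int) j =>
        if j == i then bs
        else
          let ov := compute_overlapA read_i (PySem.List.pyGetD reads j "") min_overlap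
          if ov > bs.2 then (some j, ov) else bs) (none, 0)
      (st.1.set i.toNat best.1, st.2.set i.toNat best.2)) init

-- ===== PORT B =====
def sepC : Char := Char.ofNat 1   -- Source B's SEP = "\x01"

-- the KMP fallback while-loop (`while q > 0 and s[i] != s[q]: q = pi[q-1]`), totalized with
-- fuel = the entering q: the prefix-function invariant pi[j] ≤ j makes that fuel sufficient
def kmpFall (s : List Char) (pi : List Nat) (c : Char) : Nat → Nat → Nat
  | 0, q => q
  | fuel + 1, q =>
    if 0 < q ∧ s.getD q ' ' ≠ c then kmpFall s pi c fuel (pi.getD (q - 1) 0) else q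

-- one iteration of Source B's `for i in range(1, len(s))` body over the state (pi, q)
def kmpStep (s : List Char) (st : List Nat × Nat) (i : Nat) : List Nat × Nat :=
  let q1 := kmpFall s st.1 (s.getD i ' ') st.2 st.2
  let q2 := if s.getD i ' ' = s.getD q1 ' ' then q1 + 1 else q1
  (st.1 ++ [q2], q2)

def kmpOv (a b : String) (min_overlap : Int) : Int :=
  let s := b.toList ++ sepC :: a.toList
  let st := (List.range' 1 (s.length - 1)).foldl (kmpStep s) ([0], 0)
  if min_overlap ≤ (st.2 : Int) then (st.2 : Int) else 0

def entryB (reads : List String) (index : List (String × List Int)) (k min_overlap : Int) (i : Int) (a : String) : Option Int × Int :=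
  if PySem.Str.len a < k then (none, 0)
  else
    let scored := ((PySem.Dict.ofList index).getD (PySem.Str.slice a (some (-k)) none) []).foldl
      (fun (acc : List (Int × Int)) j =>
        if j != i then
          let ov := kmpOv a (PySem.List.pyGetD reads j "") min_overlap
          if ov > 0 then acc ++ [(ov, j)] else acc
        else acc) []
    match PySem.List.max? scored (fun t => t.1) with
    | none => (none, 0)
    | some t => (some t.2, t.1)

def compute_best_successors_alt (reads : List String) (index : List (String × List Int)) (k : Int) (min_overlap : Int) : List (Option Int) × List Int :=
  let pairs := (PySem.List.enumerate reads).map (fun p => entryB reads index k min_overlap p.1 p.2)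
  (pairs.map (fun p => p.1), pairs.map (fun p => p.2))

-- ===== PRECONDITION & SPEC =====
-- Pre_ excludes exactly the inputs on which Python A raises IndexError: some candidate list,
-- reached through a read's suffix k-mer, holding an index outside range(-len(reads), len(reads)).
def Pre_compute_best_successors (reads : List String) (index : List (String × List Int)) (k : Int) (min_overlap : Int) : Prop :=
  ∀ t : Nat, t < reads.length →
    ¬ (PySem.Str.len (reads.getD t "") < k) →
    ∀ j ∈ (PySem.Dict.ofList index).getD (PySem.Str.slice (reads.getD t "") (some (-k)) none) [],
      PySem.Raise.InRange reads.length j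
instance (reads : List String) (index : List (String × List Int)) (k : Int) (min_overlap : Int) : Decidable (Pre_compute_best_successors reads index k min_overlap) := by unfold Pre_compute_best_successors; infer_instance

def pvWitness_compute_best_successors : List String × (List (String × List Int)) × Int × Int :=
  (["ab", "ba"], [("b", [1]), ("a", [0])], 1, 1)

def Spec_compute_best_successors (reads : List String) (index : List (String × List Int)) (k : Int) (min_overlap : Int) (out : List (Option Int) × List Int) : Prop := out = compute_best_successors_alt reads index k min_overlap
instance (reads : List String) (index : List (String × List Int)) (k : Int) (min_overlap : Int) (out : List (Option Int) × List Int) : Decidable (Spec_compute_best_successors reads index k min_overlap out) := by unfold Spec_compute_best_successors; infer_instance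

-- ===== CLAIM (what is proved, stated in full; the proofs are below) =====
def Claim_equal_compute_best_successors : Prop := ∀ (reads : List String) (index : List (String × List Int)) (k : Int) (min_overlap : Int), Dom_compute_best_successors reads index k min_overlap → Pre_compute_best_successors reads index k min_overlap → Spec_compute_best_successors reads index k min_overlap (compute_best_successors reads index k min_overlap)

-- ===== LEMMAS AND PROOFS =====

-- the match predicate of A's overlap scan
def ovP (a b : String) (ov : Int) : Bool :=
  PySem.Str.slice a (some (-ov)) none == PySem.Str.slice b none (some ov)

theorem overlapLoopA_eq_find (a b : String) (l : List Int) :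
    overlapLoopA a b l = ((l.find? (ovP a b)).getD 0) := by
  induction l with
  | nil => rfl
  | cons x t ih =>
    simp only [overlapLoopA, List.find?_cons, ovP]
    by_cases h : PySem.Str.slice a (some (-x)) none == PySem.Str.slice b none (some x)
    · simp [h]
    · simp [h, ih]

-- ---------- borders and the prefix function ----------

-- p is a border length of the m-prefix of s (p = m allowed)
def bordB (s : List Char) (m p : Nat) : Bool :=
  decide (p ≤ m) && (s.take p == (s.take m).drop (m - p))

-- longest PROPER border of the m-prefix
def mb (s : List Char) (m : Nat) : Nat :=
  Nat.findGreatest (fun p => bordB s m p = true) (m - 1)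

theorem bordB_iff (s : List Char) (m p : Nat) :
    bordB s m p = true ↔ p ≤ m ∧ s.take p = (s.take m).drop (m - p) := by
  simp [bordB]

theorem bordB_zero (s : List Char) (m : Nat) : bordB s m 0 = true := by
  have h : (s.take m).drop (m - 0) = [] :=
    List.drop_eq_nil_of_le (by simp)
  simp [bordB, h]

theorem bordB_succ (s : List Char) (m p : Nat) (hm : m < s.length) (hp : p ≤ m) :
    bordB s (m + 1) (p + 1) = true ↔ (bordB s m p = true ∧ s.getD p ' ' = s.getD m ' ') := by
  have hplt : p < s.length := lt_of_le_of_lt hp hm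
  have htp : s.take (p + 1) = s.take p ++ [s[p]] := by
    rw [List.take_succ]
    simp [List.getElem?_eq_getElem hplt]
  have htm : s.take (m + 1) = s.take m ++ [s[m]] := by
    rw [List.take_succ]
    simp [List.getElem?_eq_getElem hm]
  have hdrop : (s.take (m + 1)).drop (m + 1 - (p + 1)) = (s.take m).drop (m - p) ++ [s[m]] := by
    have e : m + 1 - (p + 1) = m - p := by omega
    rw [htm, e, List.drop_append_of_le_length (by rw [List.length_take]; omega)]
  have hgp : s.getD p ' ' = s[p] := List.getD_eq_getElem s ' ' hplt
  have hgm : s.getD m ' ' = s[m] := List.getD_eq_getElem s ' ' hm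
  rw [bordB_iff, bordB_iff, htp, hdrop, hgp, hgm]
  constructor
  · rintro ⟨h1, h2⟩
    rcases List.append_inj' h2 rfl with ⟨e1, e2⟩
    exact ⟨⟨hp, e1⟩, by simpa using e2⟩
  · rintro ⟨⟨h1, h2⟩, h3⟩
    exact ⟨by omega, by rw [h2, h3]⟩

theorem bord_trans (s : List Char) (m q p : Nat)
    (h1 : bordB s q p = true) (h2 : bordB s m q = true) : bordB s m p = true := by
  rw [bordB_iff] at h1 h2 ⊢
  obtain ⟨hpq, e1⟩ := h1
  obtain ⟨hqm, e2⟩ := h2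
  refine ⟨le_trans hpq hqm, ?_⟩
  rw [e1, e2, List.drop_drop]
  congr 1
  omega

theorem bord_nest (s : List Char) (m q p : Nat)
    (h1 : bordB s m p = true) (h2 : bordB s m q = true) (hpq : p ≤ q) : bordB s q p = true := by
  rw [bordB_iff] at h1 h2 ⊢
  obtain ⟨hpm, e1⟩ := h1
  obtain ⟨hqm, e2⟩ := h2
  refine ⟨hpq, ?_⟩
  rw [e2, List.drop_drop, e1]
  congr 1
  omega

theorem mb_le (s : List Char) (m : Nat) : mb s m ≤ m - 1 :=
  Nat.findGreatest_le (m - 1)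

theorem mb_lt (s : List Char) (m : Nat) (hm : 1 ≤ m) : mb s m < m := by
  have := mb_le s m
  omega

theorem mb_bord (s : List Char) (m : Nat) : bordB s m (mb s m) = true := by
  unfold mb
  exact Nat.findGreatest_spec (P := fun p => bordB s m p = true) (Nat.zero_le _) (bordB_zero s m)

theorem mb_max (s : List Char) (m p : Nat) (hp : bordB s m p = true) (hle : p ≤ m - 1) :
    p ≤ mb s m :=
  Nat.le_findGreatest hle hp

theorem fall_spec (s : List Char) (m : Nat) (pi : List Nat) (c : Char)
    (hpi : ∀ j, j < m → pi.getD j 0 = mb s (j + 1)) :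
    ∀ fuel q, q ≤ fuel → q < m → bordB s m q = true →
      (kmpFall s pi c fuel q ≤ q ∧ kmpFall s pi c fuel q < m ∧
       bordB s m (kmpFall s pi c fuel q) = true ∧
       (kmpFall s pi c fuel q = 0 ∨ s.getD (kmpFall s pi c fuel q) ' ' = c) ∧
       ∀ p, p ≤ q → bordB s m p = true → s.getD p ' ' = c → p ≤ kmpFall s pi c fuel q) := by
  intro fuel
  induction fuel with
  | zero =>
    intro q hq hqm hbord
    have hq0 : q = 0 := by omega
    subst hq0
    exact ⟨le_refl _, hqm, hbord, Or.inl rfl, fun p hp _ _ => hp⟩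
  | succ fuel ih =>
    intro q hq hqm hbord
    by_cases hcond : 0 < q ∧ s.getD q ' ' ≠ c
    · obtain ⟨hq0, hne⟩ := hcond
      have hrw : kmpFall s pi c (fuel + 1) q = kmpFall s pi c fuel (pi.getD (q - 1) 0) := by
        simp only [kmpFall, if_pos (⟨hq0, hne⟩ : 0 < q ∧ s.getD q ' ' ≠ c)]
      have hq' : pi.getD (q - 1) 0 = mb s q := by
        have := hpi (q - 1) (by omega)
        rwa [Nat.sub_add_cancel hq0] at this
      have hmbq : mb s q < q := mb_lt s q hq0
      have hq'le : pi.getD (q - 1) 0 ≤ fuel := by omega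
      have hq'm : pi.getD (q - 1) 0 < m := by omega
      have hbord' : bordB s m (pi.getD (q - 1) 0) = true := by
        rw [hq']
        exact bord_trans s m q (mb s q) (mb_bord s q) hbord
      obtain ⟨i1, i2, i3, i4, i5⟩ := ih (pi.getD (q - 1) 0) hq'le hq'm hbord'
      rw [hrw]
      refine ⟨by omega, i2, i3, i4, ?_⟩
      intro p hp hpb hpc
      have hpq : p < q := by
        rcases Nat.lt_or_ge p q with h | h
        · exact h
        · have : p = q := by omega
          subst this
          exact absurd hpc hne
      have hpbq : bordB s q p = true := bord_nest s m q p hpb hbord (by omega)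
      have hple : p ≤ mb s q := mb_max s q p hpbq (by omega)
      exact i5 p (by omega) hpb hpc
    · have hrw : kmpFall s pi c (fuel + 1) q = q := by
        simp only [kmpFall, if_neg hcond]
      rw [hrw]
      refine ⟨le_refl _, hqm, hbord, ?_, fun p hp _ _ => hp⟩
      by_cases hq0 : q = 0
      · exact Or.inl hq0
      · right
        by_contra hne
        exact hcond ⟨by omega, hne⟩

theorem kmp_step_correct (s : List Char) (m : Nat) (hm1 : 1 ≤ m) (hm : m < s.length)
    (pi : List Nat) (hpi : ∀ j, j < m → pi.getD j 0 = mb s (j + 1)) :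
    kmpStep s (pi, mb s m) m = (pi ++ [mb s (m + 1)], mb s (m + 1)) := by
  simp only [kmpStep]
  set c := s.getD m ' ' with hc
  set r := kmpFall s pi c (mb s m) (mb s m) with hr
  have hq0m : mb s m < m := mb_lt s m hm1
  obtain ⟨r1, r2, r3, r4, r5⟩ :=
    fall_spec s m pi c hpi (mb s m) (mb s m) (le_refl _) hq0m (mb_bord s m)
  have hmain : (if c = s.getD r ' ' then r + 1 else r) = mb s (m + 1) := by
    by_cases heq : c = s.getD r ' '
    · rw [if_pos heq]
      apply le_antisymm
      · exact mb_max s (m + 1) (r + 1)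
          ((bordB_succ s m r hm (by omega)).mpr ⟨r3, heq.symm⟩) (by omega)
      · set z := mb s (m + 1) with hz
        rcases Nat.eq_zero_or_pos z with h0 | hpos
        · omega
        · have hzb : bordB s (m + 1) z = true := mb_bord s (m + 1)
          have hzle : z ≤ m := by have := mb_le s (m + 1); omega
          have hz1 : z = (z - 1) + 1 := by omega
          rw [hz1] at hzb
          obtain ⟨hb, hcc⟩ := (bordB_succ s m (z - 1) hm (by omega)).mp hzb
          have := r5 (z - 1) (mb_max s m (z - 1) hb (by omega)) hb (by rw [hcc])
          omega
    · rw [if_neg heq]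
      have hr0 : r = 0 := by
        rcases r4 with h | h
        · exact h
        · exact absurd h.symm heq
      rw [hr0]
      symm
      rw [show mb s (m + 1) = Nat.findGreatest (fun p => bordB s (m + 1) p = true) m from rfl,
        Nat.findGreatest_eq_zero_iff]
      intro n hn hnm hnb
      have hn1 : n = (n - 1) + 1 := by omega
      rw [hn1] at hnb
      obtain ⟨hb, hcc⟩ := (bordB_succ s m (n - 1) hm (by omega)).mp hnb
      have hler : n - 1 ≤ r := r5 (n - 1) (mb_max s m (n - 1) hb (by omega)) hb (by rw [hcc])
      rw [hr0] at hler
      have hn0 : n - 1 = 0 := by omega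
      rw [hn0] at hcc
      rw [hr0] at heq
      exact heq hcc.symm
  rw [hmain]

theorem kmp_loop (s : List Char) (hs : 1 ≤ s.length) :
    ∀ t, t ≤ s.length - 1 →
      (List.range' 1 t).foldl (kmpStep s) ([0], 0)
        = ((List.range (t + 1)).map (fun j => mb s (j + 1)), mb s (t + 1)) := by
  intro t
  induction t with
  | zero =>
    intro _
    have h1 : mb s 1 = 0 := rfl
    simp [h1]
  | succ t ih =>
    intro ht
    rw [List.range'_concat, List.foldl_append, ih (by omega)]
    simp only [List.foldl_cons, List.foldl_nil]
    have hi : 1 + 1 * t = t + 1 := by omega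
    rw [hi]
    have hstep := kmp_step_correct s (t + 1) (by omega) (by omega)
      ((List.range (t + 1)).map (fun j => mb s (j + 1)))
      (by
        intro j hj
        rw [List.getD_eq_getElem _ _ (by simp; omega)]
        simp)
    rw [hstep]
    rw [List.range_succ (n := t + 1), List.map_append, List.range_succ (n := t), List.map_append]
    simp

-- ---------- the separator trick ----------

theorem bord_le_min (a b : List Char) (ha : sepC ∉ a) (hb : sepC ∉ b) (p : Nat)
    (hp : bordB (b ++ sepC :: a) (b ++ sepC :: a).length p = true)
    (hproper : p ≤ (b ++ sepC :: a).length - 1) :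
    p ≤ min a.length b.length := by
  set s := b ++ sepC :: a with hsdef
  have hlen : s.length = b.length + a.length + 1 := by simp [hsdef]; omega
  rw [bordB_iff] at hp
  obtain ⟨hple, e⟩ := hp
  rw [List.take_length] at e
  have hsep : s[b.length]? = some sepC := by
    rw [hsdef, List.getElem?_append_right (le_refl _)]
    simp
  have h1 : p ≤ b.length := by
    by_contra hgt
    rw [Nat.not_le] at hgt
    have hx := congrArg (fun l => l[b.length]?) e
    simp only at hx
    rw [List.getElem?_take_of_lt hgt, hsep, List.getElem?_drop] at hx
    have hidx : s.length - p + b.length = b.length + 1 + (s.length - p - 1) := by omega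
    rw [hidx, hsdef, List.getElem?_append_right (by simp; omega)] at hx
    have hj : b.length + 1 + (s.length - p - 1) - b.length = (s.length - p - 1) + 1 := by omega
    rw [hj] at hx
    simp only [List.getElem?_cons_succ] at hx
    exact ha (List.mem_of_getElem? hx.symm)
  have h2 : p ≤ a.length := by
    by_contra hgt
    rw [Nat.not_le] at hgt
    have hx := congrArg (fun l => l[p - a.length - 1]?) e
    simp only at hx
    have hi0 : p - a.length - 1 < p := by omega
    rw [List.getElem?_take_of_lt hi0, List.getElem?_drop] at hx
    have hidx : s.length - p + (p - a.length - 1) = b.length := by omega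
    rw [hidx, hsep] at hx
    have hblt : p - a.length - 1 < b.length := by omega
    rw [hsdef, List.getElem?_append_left hblt] at hx
    exact hb (List.mem_of_getElem? hx)
  omega

theorem bord_char (a b : List Char) (p : Nat) (hp : p ≤ min a.length b.length) :
    bordB (b ++ sepC :: a) (b ++ sepC :: a).length p = true
      ↔ b.take p = a.drop (a.length - p) := by
  set s := b ++ sepC :: a with hsdef
  have hlen : s.length = b.length + a.length + 1 := by simp [hsdef]; omega
  rw [bordB_iff, List.take_length]
  have htake : s.take p = b.take p := by
    rw [hsdef, List.take_append_of_le_length (by omega)]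
  have hdrop : s.drop (s.length - p) = a.drop (a.length - p) := by
    have hsplit : s.length - p = b.length + (1 + (a.length - p)) := by omega
    rw [hsplit, ← List.drop_drop, ← List.drop_drop, hsdef, List.drop_left]
    simp
  rw [htake, hdrop]
  constructor
  · exact fun h => h.2
  · exact fun h => ⟨by omega, h⟩

-- ---------- ovP vs borders, and the overlap relation ----------

theorem ovP_iff_bord (a b : String) (ov : Int) (h1 : 1 ≤ ov)
    (h2 : ov ≤ min (PySem.Str.len a) (PySem.Str.len b)) :
    ovP a b ov = true
      ↔ bordB (b.toList ++ sepC :: a.toList) (b.toList ++ sepC :: a.toList).length ov.toNat = true := by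
  have hn : ov = ((ov.toNat : Nat) : Int) := by omega
  have hmin : ov.toNat ≤ min a.toList.length b.toList.length := by
    rw [PySem.Str.len_eq, PySem.Str.len_eq] at h2
    omega
  have e1 : (PySem.Str.slice a (some (-ov)) none).toList = a.toList.drop (a.toList.length - ov.toNat) := by
    rw [PySem.Str.toList_slice, PySem.Chars.slice_eq_listSlice, hn]
    exact PySem.List.slice_from_neg_natCast a.toList ov.toNat (by omega)
  have e2 : (PySem.Str.slice b none (some ov)).toList = b.toList.take ov.toNat := by
    rw [PySem.Str.toList_slice, PySem.Chars.slice_eq_listSlice, hn]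
    exact PySem.List.slice_to_natCast b.toList ov.toNat
  rw [bord_char a.toList b.toList ov.toNat hmin]
  constructor
  · intro h
    have hstr : PySem.Str.slice a (some (-ov)) none = PySem.Str.slice b none (some ov) := by
      simpa [ovP] using h
    have hl := congrArg String.toList hstr
    rw [e1, e2] at hl
    exact hl.symm
  · intro h
    have hl : (PySem.Str.slice a (some (-ov)) none).toList = (PySem.Str.slice b none (some ov)).toList := by
      rw [e1, e2]
      exact h.symm
    have hstr := String.toList_inj.mp hl
    simp [ovP, hstr]

theorem kmpOv_eq_mb (a b : String) (mo : Int) :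
    kmpOv a b mo
      = (if mo ≤ ((mb (b.toList ++ sepC :: a.toList) (b.toList ++ sepC :: a.toList).length : Nat) : Int)
         then ((mb (b.toList ++ sepC :: a.toList) (b.toList ++ sepC :: a.toList).length : Nat) : Int) else 0) := by
  have hs : 1 ≤ (b.toList ++ sepC :: a.toList).length := by simp; omega
  have hloop := kmp_loop (b.toList ++ sepC :: a.toList) hs ((b.toList ++ sepC :: a.toList).length - 1) (le_refl _)
  have hfix : (b.toList ++ sepC :: a.toList).length - 1 + 1 = (b.toList ++ sepC :: a.toList).length := by omega
  rw [hfix] at hloop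
  show (if mo ≤ ((((List.range' 1 ((b.toList ++ sepC :: a.toList).length - 1)).foldl (kmpStep (b.toList ++ sepC :: a.toList)) ([0], 0)).2 : Nat) : Int)
        then ((((List.range' 1 ((b.toList ++ sepC :: a.toList).length - 1)).foldl (kmpStep (b.toList ++ sepC :: a.toList)) ([0], 0)).2 : Nat) : Int) else 0) = _
  rw [hloop]

-- A's overlap value vs B's: equal, or A's is nonpositive while B's is 0.
theorem ov_rel (a b : String) (mo : Int)
    (ha : sepC ∉ a.toList) (hb : sepC ∉ b.toList) :
    compute_overlapA a b mo = kmpOv a b mo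
    ∨ (compute_overlapA a b mo ≤ 0 ∧ kmpOv a b mo = 0) := by
  have hml : min (PySem.Str.len a) (PySem.Str.len b)
      = ((min a.toList.length b.toList.length : Nat) : Int) := by
    rw [PySem.Str.len_eq, PySem.Str.len_eq]
    omega
  set ml : Nat := min a.toList.length b.toList.length with hmldef
  set S := b.toList ++ sepC :: a.toList with hS
  set z : Nat := mb S S.length with hzdef
  have hSlen : S.length = b.toList.length + a.toList.length + 1 := by
    rw [hS]; simp; omega
  have hkmp := kmpOv_eq_mb a b mo
  rw [← hS] at hkmp
  rw [← hzdef] at hkmp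
  have hzb : bordB S S.length z = true := mb_bord S S.length
  have hzle : z ≤ S.length - 1 := mb_le S S.length
  have hz_min : 1 ≤ z → z ≤ ml := fun _ => bord_le_min a.toList b.toList ha hb z hzb hzle
  have hz_max : ∀ p : Nat, p ≤ ml → bordB S S.length p = true → p ≤ z := by
    intro p hp hb'
    exact mb_max S S.length p hb' (by omega)
  have hovP_iff : ∀ ov : Int, 1 ≤ ov → ov ≤ (ml : Int) →
      (ovP a b ov = true ↔ bordB S S.length ov.toNat = true) := by
    intro ov h1 h2
    exact ovP_iff_bord a b ov h1 (by rw [hml]; exact h2)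
  have hA : compute_overlapA a b mo
      = ((PySem.List.pyRange ((ml : Int)) (mo - 1) (-1)).find? (ovP a b)).getD 0 := by
    unfold compute_overlapA
    rw [overlapLoopA_eq_find, hml]
  have hrev : PySem.List.pyRange ((ml : Int)) (mo - 1) (-1)
      = (PySem.List.pyRange mo ((ml : Int) + 1)).reverse := by
    rw [PySem.List.pyRange_neg_one_eq_reverse]
    congr 2
    omega
  by_cases hcase : 1 ≤ z ∧ mo ≤ (z : Int)
  · left
    obtain ⟨h1, h2⟩ := hcase
    have hzml : z ≤ ml := hz_min h1
    have hsplit1 : PySem.List.pyRange mo ((ml : Int) + 1)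
        = PySem.List.pyRange mo ((z : Int) + 1) ++ PySem.List.pyRange ((z : Int) + 1) ((ml : Int) + 1) :=
      PySem.List.pyRange_one_append mo ((z : Int) + 1) ((ml : Int) + 1) (by omega) (by omega)
    have hsplit2 : PySem.List.pyRange mo ((z : Int) + 1)
        = PySem.List.pyRange mo (z : Int) ++ PySem.List.pyRange (z : Int) ((z : Int) + 1) :=
      PySem.List.pyRange_one_append mo (z : Int) ((z : Int) + 1) h2 (by omega)
    have hsing : PySem.List.pyRange (z : Int) ((z : Int) + 1) = [(z : Int)] := by
      rw [PySem.List.pyRange_one_cons (by omega)]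
      simp [PySem.List.pyRange_one]
    have hnone : ((PySem.List.pyRange ((z : Int) + 1) ((ml : Int) + 1)).reverse.find? (ovP a b)) = none := by
      rw [List.find?_eq_none]
      intro y hy
      rw [List.mem_reverse, PySem.List.mem_pyRange_one] at hy
      intro hpy
      have hbord := (hovP_iff y (by omega) (by omega)).mp hpy
      have := hz_max y.toNat (by omega) hbord
      omega
    have hpz : ovP a b (z : Int) = true := by
      apply (hovP_iff (z : Int) (by omega) (by omega)).mpr
      simpa using hzb
    rw [hA, hrev, hsplit1, hsplit2, List.reverse_append, List.reverse_append, hsing,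
      List.find?_append, hnone]
    simp only [Option.none_or, List.reverse_cons, List.reverse_nil, List.nil_append,
      List.singleton_append]
    rw [List.find?_cons_of_pos hpz, hkmp, if_pos h2]
    simp
  · by_cases hmo1 : 1 ≤ mo
    · left
      have hznm : ¬ (mo ≤ (z : Int)) := by
        intro h
        exact hcase ⟨by omega, h⟩
      have hnone : ((PySem.List.pyRange mo ((ml : Int) + 1)).reverse.find? (ovP a b)) = none := by
        rw [List.find?_eq_none]
        intro y hy
        rw [List.mem_reverse, PySem.List.mem_pyRange_one] at hy
        intro hpy
        have hbord := (hovP_iff y (by omega) (by omega)).mp hpy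
        have := hz_max y.toNat (by omega) hbord
        omega
      rw [hA, hrev, hnone, hkmp, if_neg hznm]
      rfl
    · right
      have hz0 : z = 0 := by
        by_contra hzz
        exact hcase ⟨by omega, by omega⟩
      constructor
      · rw [hA]
        cases hf : (PySem.List.pyRange ((ml : Int)) (mo - 1) (-1)).find? (ovP a b) with
        | none => simp
        | some w =>
          have hpw : ovP a b w = true := List.find?_some hf
          have hwmem := List.mem_of_find?_eq_some hf
          rw [hrev, List.mem_reverse, PySem.List.mem_pyRange_one] at hwmem
          by_cases hw1 : 1 ≤ w
          · exfalso
            have hbord := (hovP_iff w hw1 (by omega)).mp hpw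
            have := hz_max w.toNat (by omega) hbord
            omega
          · simp only [Option.getD_some]
            omega
      · rw [hkmp, hz0]
        split_ifs <;> simp

-- ---------- the candidate loop, shared by both ports ----------

def stepA (Av : Int → Int) (i : Int) (bs : Option Int × Int) (j : Int) : Option Int × Int :=
  if j == i then bs else if Av j > bs.2 then (some j, Av j) else bs

def relMB (acc : Option (Int × Int)) (bs : Option Int × Int) : Prop :=
  (acc = none ∧ bs = (none, 0)) ∨ (∃ ov j, acc = some (ov, j) ∧ bs = (some j, ov) ∧ 0 < ov)

theorem step1 (Av Bv : Int → Int) (i : Int)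
    (hov : ∀ j, Av j = Bv j ∨ (Av j ≤ 0 ∧ Bv j = 0)) :
    ∀ (cs : List Int) (s : Option Int × Int), 0 ≤ s.2 →
      cs.foldl (stepA Av i) s = cs.foldl (stepA Bv i) s := by
  intro cs
  induction cs with
  | nil => intro s _; rfl
  | cons j t ih =>
    intro s hs
    simp only [List.foldl_cons]
    have hstep : stepA Av i s j = stepA Bv i s j ∧ 0 ≤ (stepA Av i s j).2 := by
      unfold stepA
      by_cases hji : j == i
      · simp [hji, hs]
      · simp only [hji, Bool.false_eq_true, if_false]
        rcases hov j with h | ⟨h1, h2⟩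
        · rw [h]
          split_ifs with hgt
          · simp; omega
          · simp; omega
        · rw [h2]
          have hA : ¬ Av j > s.2 := by omega
          have hB : ¬ (0:Int) > s.2 := by omega
          split_ifs <;> simp_all
    rw [hstep.1]
    exact ih _ (hstep.1 ▸ hstep.2)

def mstepP (acc : Option (Int × Int)) (x : Int × Int) : Option (Int × Int) :=
  match acc with
  | none => some x
  | some m => if m.1 < x.1 then some x else some m

def mstep (Bv : Int → Int) (acc : Option (Int × Int)) (j : Int) : Option (Int × Int) :=
  mstepP acc (Bv j, j)

theorem step2 (Bv : Int → Int) (i : Int) :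
    ∀ (cs : List Int) (acc : Option (Int × Int)) (bs : Option Int × Int), relMB acc bs →
      relMB (cs.foldl (fun acc j => if (j != i && decide (0 < Bv j)) then mstep Bv acc j else acc) acc)
        (cs.foldl (stepA Bv i) bs) := by
  intro cs
  induction cs with
  | nil => intro acc bs h; exact h
  | cons j t ih =>
    intro acc bs h
    simp only [List.foldl_cons]
    apply ih
    by_cases hji : j == i
    · have hne : (j != i) = false := by simp_all
      simp only [hne, Bool.false_and, if_false, stepA, hji, if_true]
      exact h
    · have hne : (j != i) = true := by simp_all
      by_cases hpos : 0 < Bv j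
      · simp only [hne, hpos, decide_true, Bool.and_self, if_true, stepA, hji,
          Bool.false_eq_true, if_false, mstep, mstepP]
        rcases h with ⟨ha, hb⟩ | ⟨ov, j0, ha, hb, hpos0⟩
        · subst ha; subst hb
          simp only [hpos, if_pos]
          right; exact ⟨Bv j, j, rfl, rfl, hpos⟩
        · subst ha; subst hb
          simp only
          by_cases hcmp : ov < Bv j
          · simp only [hcmp, if_pos]
            right; exact ⟨Bv j, j, rfl, rfl, hpos⟩
          · have hng : ¬ (Bv j > ov) := by omega
            simp only [hcmp]
            right; exact ⟨ov, j0, rfl, rfl, hpos0⟩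
      · have hdec : (decide (0 < Bv j)) = false := by simp_all
        simp only [hdec, Bool.and_false, if_false, stepA, hji, Bool.false_eq_true]
        have hbs2 : ¬ (Bv j > bs.2) := by
          rcases h with ⟨_, hb⟩ | ⟨ov, j0, _, hb, hp⟩ <;> subst hb <;> simp <;> omega
        simp only [if_false, hbs2]
        exact h

theorem max?_filter_fold (Bv : Int → Int) (p : Int → Bool) :
    ∀ (cs : List Int) (acc : Option (Int × Int)),
      ((cs.filter p).map (fun j => (Bv j, j))).foldl mstepP acc
        = cs.foldl (fun acc j => if p j then mstep Bv acc j else acc) acc := by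
  intro cs
  induction cs with
  | nil => intro acc; rfl
  | cons j t ih =>
    intro acc
    by_cases hp : p j
    · simp only [List.filter_cons, hp, if_true, List.map_cons, List.foldl_cons]
      rw [ih]
      rfl
    · simp only [List.filter_cons, hp, Bool.false_eq_true, if_false, List.foldl_cons]
      exact ih acc

-- B's entry, rewritten as the common fold
theorem entryB_eq_fold (reads : List String) (index : List (String × List Int)) (k mo : Int)
    (i : Int) (a : String) (hlen : ¬ PySem.Str.len a < k) :
    entryB reads index k mo i a
      = ((PySem.Dict.ofList index).getD (PySem.Str.slice a (some (-k)) none) []).foldl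
          (stepA (fun j => kmpOv a (PySem.List.pyGetD reads j "") mo) i) (none, 0) := by
  unfold entryB
  rw [if_neg hlen]
  set Bv : Int → Int := fun j => kmpOv a (PySem.List.pyGetD reads j "") mo with hBv
  set cs := ((PySem.Dict.ofList index).getD (PySem.Str.slice a (some (-k)) none) []) with hcs
  have hscored : cs.foldl
      (fun (acc : List (Int × Int)) j =>
        if j != i then
          let ov := kmpOv a (PySem.List.pyGetD reads j "") mo
          if ov > 0 then acc ++ [(ov, j)] else acc
        else acc) []
      = ([] : List (Int × Int)) ++ ((cs.filter (fun j => j != i && decide (0 < Bv j))).map (fun j => (Bv j, j))) := by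
    rw [← PySem.List.foldl_append_if (fun j => j != i && decide (0 < Bv j)) (fun j => (Bv j, j)) cs []]
    apply PySem.List.foldl_congr_mem
    intro acc j _
    by_cases hji : j != i
    · by_cases hpos : 0 < Bv j
      · simp [hji, hpos, hBv]
      · simp [hji, hpos, hBv]
    · simp [hji]
  simp only [hscored, List.nil_append]
  have hmax : PySem.List.max? ((cs.filter (fun j => j != i && decide (0 < Bv j))).map (fun j => (Bv j, j))) (fun t => t.1)
      = cs.foldl (fun acc j => if (j != i && decide (0 < Bv j)) then mstep Bv acc j else acc) none := by
    have hbridge : PySem.List.max? ((cs.filter (fun j => j != i && decide (0 < Bv j))).map (fun j => (Bv j, j))) (fun t => t.1)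
        = ((cs.filter (fun j => j != i && decide (0 < Bv j))).map (fun j => (Bv j, j))).foldl mstepP none :=
      PySem.List.foldl_congr_mem _ _ mstepP none (fun acc x _ => by cases acc <;> rfl)
    rw [hbridge]
    exact max?_filter_fold Bv (fun j => j != i && decide (0 < Bv j)) cs none
  rw [hmax]
  have h2 := step2 Bv i cs none (none, 0) (Or.inl ⟨rfl, rfl⟩)
  rcases h2 with ⟨ha, hb⟩ | ⟨ov, j, ha, hb, _⟩
  · rw [ha, hb]
  · rw [ha, hb]

-- A's per-index value
def Fpair (reads : List String) (index : List (String × List Int)) (k min_overlap : Int) (i : Int) : Option Int × Int :=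
  let read_i := PySem.List.pyGetD reads i ""
  if PySem.Str.len read_i < k then (none, 0)
  else ((PySem.Dict.ofList index).getD (PySem.Str.slice read_i (some (-k)) none) []).foldl
      (stepA (fun j => compute_overlapA read_i (PySem.List.pyGetD reads j "") min_overlap) i) (none, 0)

theorem foldl_range_set {α : Type} (c : Nat → Bool) (g : Nat → α) (d : α) (n : Nat) :
    ∀ cnt, cnt ≤ n →
      (List.range cnt).foldl (fun u t => if c t then u else u.set t (g t)) (List.replicate n d)
        = (List.range cnt).map (fun t => if c t then d else g t) ++ List.replicate (n - cnt) d := by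
  intro cnt
  induction cnt with
  | zero => intro _; simp
  | succ m ih =>
    intro hle
    rw [List.range_succ, List.foldl_append, ih (by omega), List.map_append]
    have hrep : List.replicate (n - m) d = d :: List.replicate (n - (m + 1)) d := by
      have : n - m = (n - (m + 1)) + 1 := by omega
      rw [this, List.replicate_succ]
    simp only [List.foldl_cons, List.foldl_nil]
    by_cases hc : c m
    · simp only [hc, if_true, List.map_cons, List.map_nil]
      rw [hrep]
      simp
    · simp only [hc, if_false, List.map_cons, List.map_nil, Bool.false_eq_true]
      rw [List.set_append, hrep]
      have hlen : ((List.range m).map (fun t => if c t = true then d else g t)).length = m := by simp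
      rw [hlen]
      simp

theorem A_eq_map (reads : List String) (index : List (String × List Int)) (k min_overlap : Int) :
    compute_best_successors reads index k min_overlap
      = ((List.range reads.length).map (fun (t : Nat) => (Fpair reads index k min_overlap (t : Int)).1),
         (List.range reads.length).map (fun (t : Nat) => (Fpair reads index k min_overlap (t : Int)).2)) := by
  unfold compute_best_successors
  simp only [PySem.List.len_eq]
  rw [PySem.List.pyRange_one, List.foldl_map]
  have hn : ((reads.length : Int) - 0).toNat = reads.length := by omega
  rw [hn]
  have hstep : (fun (st : List (Option Int) × List Int) (t : Nat) =>
      (fun (st : List (Option Int) × List Int) (i : Int) =>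
        let read_i := PySem.List.pyGetD reads i ""
        if PySem.Str.len read_i < k then st
        else
          let suffix := PySem.Str.slice read_i (some (-k)) none
          let candidates := (PySem.Dict.ofList index).getD suffix []
          let best := candidates.foldl (fun (bs : Option Int × Int) j =>
            if j == i then bs
            else
              let ov := compute_overlapA read_i (PySem.List.pyGetD reads j "") min_overlap
              if ov > bs.2 then (some j, ov) else bs) (none, 0)
          (st.1.set i.toNat best.1, st.2.set i.toNat best.2)) st (0 + (t : Int)))
      = (fun (st : List (Option Int) × List Int) (t : Nat) =>
          ((fun (u : List (Option Int)) (t : Nat) =>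
              if PySem.Str.len (PySem.List.pyGetD reads (t : Int) "") < k then u
              else u.set t (Fpair reads index k min_overlap (t : Int)).1) st.1 t,
           (fun (v : List Int) (t : Nat) =>
              if PySem.Str.len (PySem.List.pyGetD reads (t : Int) "") < k then v
              else v.set t (Fpair reads index k min_overlap (t : Int)).2) st.2 t)) := by
    funext st t
    simp only [zero_add]
    by_cases hc : PySem.Str.len (PySem.List.pyGetD reads (t : Int) "") < k
    · simp only [hc, if_true]
    · simp only [hc, if_false, Int.toNat_natCast, Fpair]
      rfl
  rw [hstep]
  rw [PySem.List.foldl_prod_mk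
    (f := fun (u : List (Option Int)) (t : Nat) =>
      if PySem.Str.len (PySem.List.pyGetD reads (t : Int) "") < k then u
      else u.set t (Fpair reads index k min_overlap (t : Int)).1)
    (g := fun (v : List Int) (t : Nat) =>
      if PySem.Str.len (PySem.List.pyGetD reads (t : Int) "") < k then v
      else v.set t (Fpair reads index k min_overlap (t : Int)).2)]
  have h1 := foldl_range_set (fun t => decide (PySem.Str.len (PySem.List.pyGetD reads (t : Int) "") < k))
      (fun t => (Fpair reads index k min_overlap (t : Int)).1) (none : Option Int) reads.length reads.length (le_refl _)
  have h2 := foldl_range_set (fun t => decide (PySem.Str.len (PySem.List.pyGetD reads (t : Int) "") < k))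
      (fun t => (Fpair reads index k min_overlap (t : Int)).2) (0 : Int) reads.length reads.length (le_refl _)
  simp only [Nat.sub_self, List.replicate_zero, List.append_nil] at h1 h2
  have hc1 : (fun (u : List (Option Int)) (t : Nat) =>
      if PySem.Str.len (PySem.List.pyGetD reads (t : Int) "") < k then u
      else u.set t (Fpair reads index k min_overlap (t : Int)).1)
    = (fun (u : List (Option Int)) (t : Nat) =>
      if (fun t => decide (PySem.Str.len (PySem.List.pyGetD reads (t : Int) "") < k)) t = true then u
      else u.set t (Fpair reads index k min_overlap (t : Int)).1) := by
    funext u t; by_cases h : PySem.Str.len (PySem.List.pyGetD reads (t : Int) "") < k <;> simp [h]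
  have hc2 : (fun (v : List Int) (t : Nat) =>
      if PySem.Str.len (PySem.List.pyGetD reads (t : Int) "") < k then v
      else v.set t (Fpair reads index k min_overlap (t : Int)).2)
    = (fun (v : List Int) (t : Nat) =>
      if (fun t => decide (PySem.Str.len (PySem.List.pyGetD reads (t : Int) "") < k)) t = true then v
      else v.set t (Fpair reads index k min_overlap (t : Int)).2) := by
    funext v t; by_cases h : PySem.Str.len (PySem.List.pyGetD reads (t : Int) "") < k <;> simp [h]
  rw [hc1, hc2, h1, h2]
  simp only [Prod.mk.injEq]
  constructor
  · apply List.map_congr_left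
    intro t _
    cases hct : (decide (PySem.Str.len (PySem.List.pyGetD reads (t : Int) "") < k)) with
    | true =>
      have h' : PySem.Str.len (PySem.List.pyGetD reads (t : Int) "") < k := of_decide_eq_true hct
      have hF : Fpair reads index k min_overlap (t : Int) = (none, 0) := by
        simp only [Fpair]; rw [if_pos h']
      rw [hF]
      simp
    | false => rfl
  · apply List.map_congr_left
    intro t _
    cases hct : (decide (PySem.Str.len (PySem.List.pyGetD reads (t : Int) "") < k)) with
    | true =>
      have h' : PySem.Str.len (PySem.List.pyGetD reads (t : Int) "") < k := of_decide_eq_true hct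
      have hF : Fpair reads index k min_overlap (t : Int) = (none, 0) := by
        simp only [Fpair]; rw [if_pos h']
      rw [hF]
      simp
    | false => simp

theorem B_eq_map (reads : List String) (index : List (String × List Int)) (k min_overlap : Int) :
    compute_best_successors_alt reads index k min_overlap
      = ((List.range reads.length).map (fun (t : Nat) =>
            (entryB reads index k min_overlap (t : Int) (PySem.List.pyGetD reads (t : Int) "")).1),
         (List.range reads.length).map (fun (t : Nat) =>
            (entryB reads index k min_overlap (t : Int) (PySem.List.pyGetD reads (t : Int) "")).2)) := by
  unfold compute_best_successors_alt
  rw [PySem.List.enumerate_eq_map_pyRange reads ""]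
  simp only [PySem.List.len_eq]
  rw [PySem.List.pyRange_one, List.map_map, List.map_map, List.map_map]
  have hn : ((reads.length : Int) - 0).toNat = reads.length := by omega
  rw [hn]
  simp only [List.map_map, Prod.mk.injEq]
  constructor
  · apply List.map_congr_left
    intro t _
    simp only [Function.comp_def, zero_add]
  · apply List.map_congr_left
    intro t _
    simp only [Function.comp_def, zero_add]

theorem fresh_of_dom (r : String) (h : pvDomStr r = true) : sepC ∉ r.toList := by
  intro hmem
  have := List.all_eq_true.mp h _ hmem
  simp [pvDomChar, sepC] at this

theorem fresh_getD (reads : List String) (hfresh : ∀ r ∈ reads, sepC ∉ r.toList) (j : Int) :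
    sepC ∉ (PySem.List.pyGetD reads j "").toList := by
  by_cases h : PySem.Raise.InRange reads.length j
  · exact hfresh _ (PySem.List.pyGetD_mem reads "" h)
  · have hnone : PySem.List.pyGet? reads j = none := (PySem.List.pyGet?_eq_none_iff reads j).mpr h
    simp [PySem.List.pyGetD, hnone]

theorem compute_best_successors_spec_aux (reads : List String) (index : List (String × List Int))
    (k min_overlap : Int) (hfresh : ∀ r ∈ reads, sepC ∉ r.toList) :
    compute_best_successors reads index k min_overlap = compute_best_successors_alt reads index k min_overlap := by
  rw [A_eq_map, B_eq_map]
  have hpoint : ∀ t : Nat,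
      Fpair reads index k min_overlap (t : Int)
        = entryB reads index k min_overlap (t : Int) (PySem.List.pyGetD reads (t : Int) "") := by
    intro t
    by_cases hlen : PySem.Str.len (PySem.List.pyGetD reads (t : Int) "") < k
    · simp only [Fpair, entryB]
      rw [if_pos hlen, if_pos hlen]
    · rw [entryB_eq_fold reads index k min_overlap (t : Int) (PySem.List.pyGetD reads (t : Int) "") hlen]
      simp only [Fpair]
      rw [if_neg hlen]
      exact step1 _ _ (t : Int)
        (fun j => ov_rel (PySem.List.pyGetD reads (t : Int) "") (PySem.List.pyGetD reads j "") min_overlap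
          (fresh_getD reads hfresh (t : Int)) (fresh_getD reads hfresh j))
        _ _ (le_refl (0 : Int))
  simp only [Prod.mk.injEq]
  constructor
  · apply List.map_congr_left
    intro t _
    rw [hpoint t]
  · apply List.map_congr_left
    intro t _
    rw [hpoint t]

-- ===== VERDICT (by name: the statement is the Claim_ definition above) =====
theorem compute_best_successors_spec : Claim_equal_compute_best_successors := by
  intro reads index k min_overlap hdom _
  unfold Spec_compute_best_successors
  have hfresh : ∀ r ∈ reads, sepC ∉ r.toList := by
    intro r hr
    apply fresh_of_dom
    simp only [Dom_compute_best_successors, Bool.and_eq_true, List.all_eq_true] at hdom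
    exact hdom.1.1.1 _ hr
  exact compute_best_successors_spec_aux reads index k min_overlap hfresh
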